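-- pv_equiv track=rewrite | github.com/Isaacst07/Algotimo_e_Programa.2025.1 | W - Bee #03 - iterações & coleções/bee_1263.py | contar_aliteracoes
-- ===== SOURCE A (Python) =====
-- def contar_aliteracoes(linha):
--     palavras = linha.strip().split()
--     aliteracoes = 0
--     i = 0
--     n = len(palavras)
--
--     while i < n:
--         letra_atual = palavras[i][0].lower()
--         grupo_tamanho = 1
--
--         for j in range(i + 1, n):
--             if palavras[j][0].lower() == letra_atual:
--                 grupo_tamanho += 1
--             else:
--                 break
--
--         if grupo_tamanho > 1:
--             aliteracoes += 1
--
--         i += grupo_tamanho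
--
--     return aliteracoes
-- ===== SOURCE B (Python) =====
-- def contar_aliteracoes(linha):
--     contador = 0
--     anterior = None
--     em_serie = False
--     for palavra in linha.strip().split():
--         letra = palavra[0].lower()
--         if letra == anterior and not em_serie:
--             contador += 1
--             em_serie = True
--         elif letra != anterior:
--             em_serie = False
--         anterior = letra
--     return contador
-- ===== Notes on version B (the rewrite author's own statement) =====
-- stated objective: simpler
-- what changed: Replaced A's index-jumping outer while loop with an inner group-measuring for loop by a single flat pass that tracks the previous word's first letter and an in-run flag, incrementing once at the start of each run of length >= 2.
import Mathlib
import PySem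

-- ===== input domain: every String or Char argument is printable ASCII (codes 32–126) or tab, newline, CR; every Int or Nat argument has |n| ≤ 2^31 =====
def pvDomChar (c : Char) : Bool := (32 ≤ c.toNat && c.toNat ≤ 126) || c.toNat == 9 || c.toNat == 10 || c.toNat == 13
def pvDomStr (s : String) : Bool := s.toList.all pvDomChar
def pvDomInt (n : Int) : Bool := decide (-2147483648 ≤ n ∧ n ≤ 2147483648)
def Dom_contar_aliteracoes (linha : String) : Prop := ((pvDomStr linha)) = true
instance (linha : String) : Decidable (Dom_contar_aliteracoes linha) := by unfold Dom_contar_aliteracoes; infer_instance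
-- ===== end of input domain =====

-- B replaces A's nested (index-jumping while + group-measuring for) loop by one flat pass
-- with a previous-letter/in-run state; same O(n) cost, simpler control flow.

-- palavra[0].lower(): first character lowercased; split() never yields "" so the [] arm is unreachable
def pvFirst (w : String) : Char :=
  match w.toList with
  | [] => ' '
  | c :: _ => PySem.Chars.lowerChar c

-- ===== PORT A =====
-- A's inner `for j in range(i+1, n): … else break`: count of the leading words matching letra
def pvCountGroup (c : Char) : List String → Nat
  | [] => 0
  | w :: t => if pvFirst w == c then 1 + pvCountGroup c t else 0

-- A's outer while loop over the suffix starting at index i (i advances by grupo_tamanho = 1 + k)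
def pvALoop : List String → Int
  | [] => 0
  | w :: rest =>
    let letra := pvFirst w
    let k := pvCountGroup letra rest
    (if 1 + k > 1 then (1:Int) else 0) + pvALoop (rest.drop k)
termination_by l => l.length
decreasing_by simp [List.length_drop]

def contar_aliteracoes (linha : String) : Int :=
  pvALoop (PySem.Str.split₀ (PySem.Str.strip linha))

-- ===== PORT B =====
-- the flat loop body: state (anterior, em_serie, contador)
def pvBgo (anterior : Option Char) (emSerie : Bool) (contador : Int) : List String → Int
  | [] => contador
  | w :: t =>
    let letra := pvFirst w
    if some letra == anterior && !emSerie then pvBgo (some letra) true (contador + 1) t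
    else if some letra != anterior then pvBgo (some letra) false contador t
    else pvBgo (some letra) emSerie contador t

def contar_aliteracoes_alt (linha : String) : Int :=
  pvBgo none false 0 (PySem.Str.split₀ (PySem.Str.strip linha))

-- ===== PRECONDITION & SPEC =====
def Spec_contar_aliteracoes (linha : String) (out : Int) : Prop := out = contar_aliteracoes_alt linha
instance (linha : String) (out : Int) : Decidable (Spec_contar_aliteracoes linha out) := by unfold Spec_contar_aliteracoes; infer_instance

-- ===== CLAIM (what is proved, stated in full; the proofs are below) =====
def Claim_equal_contar_aliteracoes : Prop := ∀ (linha : String), Dom_contar_aliteracoes linha → Spec_contar_aliteracoes linha (contar_aliteracoes linha)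

-- ===== LEMMAS AND PROOFS =====

theorem pvALoop_nil : pvALoop [] = 0 := by rw [pvALoop.eq_def]

theorem pvALoop_cons (w : String) (t : List String) :
    pvALoop (w :: t) = (if 1 + pvCountGroup (pvFirst w) t > 1 then (1:Int) else 0)
      + pvALoop (t.drop (pvCountGroup (pvFirst w) t)) := by
  rw [pvALoop.eq_def]

theorem drop_one_add (w : String) (t : List String) (k : Nat) :
    (w :: t).drop (1 + k) = t.drop k := by
  rw [Nat.add_comm]; rfl

theorem pvBgo_spec (l : List String) : ∀ (c : Char) (acc : Int),
    pvBgo (some c) false acc l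
      = acc + ((if 0 < pvCountGroup c l then (1:Int) else 0) + pvALoop (l.drop (pvCountGroup c l)))
    ∧ pvBgo (some c) true acc l = acc + pvALoop (l.drop (pvCountGroup c l)) := by
  induction l with
  | nil => intro c acc; simp [pvBgo, pvCountGroup, pvALoop_nil]
  | cons w t ih =>
    intro c acc
    by_cases h : pvFirst w = c
    · constructor
      · simp [pvBgo, h, (ih c (acc + 1)).2, pvCountGroup, drop_one_add]
        ring
      · simp [pvBgo, h, (ih c acc).2, pvCountGroup, drop_one_add]
    · have hA := pvALoop_cons w t
      constructor
      · simp [pvBgo, h, (ih (pvFirst w) acc).1, pvCountGroup, hA]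
      · simp [pvBgo, h, (ih (pvFirst w) acc).1, pvCountGroup, hA]

theorem pvBgo_none (l : List String) : pvBgo none false 0 l = pvALoop l := by
  cases l with
  | nil => simp [pvBgo, pvALoop_nil]
  | cons w t =>
    have h := (pvBgo_spec t (pvFirst w) 0).1
    rw [pvALoop_cons]
    simp [pvBgo] at h ⊢
    rw [h]

-- ===== VERDICT (by name: the statement is the Claim_ definition above) =====
theorem contar_aliteracoes_spec : Claim_equal_contar_aliteracoes := by
  intro linha _
  unfold Spec_contar_aliteracoes contar_aliteracoes contar_aliteracoes_alt
  exact (pvBgo_none _).symm
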